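-- pv_equiv track=rewrite | github.com/kakolla/Problems | medium/arrays/guards.py | countUnguarded
-- ===== SOURCE A (Python) =====
-- from typing import List
--
-- def countUnguarded(m: int, n: int, guards: List[List[int]], walls: List[List[int]]) -> int:
--     # i: m,n, walls and guards
--     # o: number of unguarded cells
--
--     # create matrix
--     grid = [[0 for i in range(n)] for j in range(m)]
--
--     # mark walls
--     for r,c in walls:
--         grid[r][c] = 2 # wall
--     # for all guards, mark their reach
--     for r,c in guards:
--         grid[r][c] = 3 # guard
--
--     # sweep left to right
--     for i in range(m):
--         seen = False
--         for j in range(n):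
--             if grid[i][j] == 2:
--                 seen = False
--             elif grid[i][j] == 3:
--                 seen = True
--             elif seen:
--                 grid[i][j] = -1 # this cell guarded
--         # go backwards
--         seen = False
--         for j in range(n-1,-1,-1):
--             if grid[i][j] == 2:
--                 seen = False
--             elif grid[i][j] == 3:
--                 seen = True
--             elif seen:
--                 grid[i][j] = -1 # this cell guarded
--
--     # sweep top to bottom
--     for j in range(n):
--         seen = False
--         for i in range(m):
--             if grid[i][j] == 2:
--                 seen = False
--             elif grid[i][j] == 3:
--                 seen = True
--             elif seen:
--                 grid[i][j] = -1 # this cell guarded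
--         seen = False
--         for i in range(m-1,-1,-1):
--             if grid[i][j] == 2:
--                 seen = False
--             elif grid[i][j] == 3:
--                 seen = True
--             elif seen:
--                 grid[i][j] = -1 # this cell guarded
--
--
--
--
--     # check unguarded
--     count = 0
--     for i in range(m):
--         for j in range(n):
--             if grid[i][j] == 0:
--                 count +=1
--     return count
-- ===== SOURCE B (Python) =====
-- def countUnguarded(m, n, guards, walls):
--     # Build the wall/guard grid once, then test each cell by walking outward in the
--     # four directions until a wall (2) or guard (3) blocks the ray: no directional
--     # sweeps, no seen flags, no grid mutation beyond placement.
--     grid = [[0] * n for _ in range(m)]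
--     for r, c in walls:
--         grid[r][c] = 2
--     for r, c in guards:
--         grid[r][c] = 3
--
--     def sees_guard(x, y, di, dj):
--         while 0 <= x < m and 0 <= y < n:
--             if grid[x][y] == 3:
--                 return True
--             if grid[x][y] == 2:
--                 return False
--             x += di
--             y += dj
--         return False
--
--     count = 0
--     for i in range(m):
--         for j in range(n):
--             if grid[i][j] == 0 and not any(
--                     sees_guard(i + di, j + dj, di, dj)
--                     for di, dj in ((0, -1), (0, 1), (-1, 0), (1, 0))):
--                 count += 1
--     return count
-- ===== Notes on version B (the rewrite author's own statement) =====
-- stated objective: alternative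
-- what changed: Keeps the wall/guard grid placement but replaces A's four full-grid directional sweeps with seen flags and -1 marking by a per-cell outward ray walk: each open cell checks in the four directions whether the first blocking cell is a guard.
import Mathlib
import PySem

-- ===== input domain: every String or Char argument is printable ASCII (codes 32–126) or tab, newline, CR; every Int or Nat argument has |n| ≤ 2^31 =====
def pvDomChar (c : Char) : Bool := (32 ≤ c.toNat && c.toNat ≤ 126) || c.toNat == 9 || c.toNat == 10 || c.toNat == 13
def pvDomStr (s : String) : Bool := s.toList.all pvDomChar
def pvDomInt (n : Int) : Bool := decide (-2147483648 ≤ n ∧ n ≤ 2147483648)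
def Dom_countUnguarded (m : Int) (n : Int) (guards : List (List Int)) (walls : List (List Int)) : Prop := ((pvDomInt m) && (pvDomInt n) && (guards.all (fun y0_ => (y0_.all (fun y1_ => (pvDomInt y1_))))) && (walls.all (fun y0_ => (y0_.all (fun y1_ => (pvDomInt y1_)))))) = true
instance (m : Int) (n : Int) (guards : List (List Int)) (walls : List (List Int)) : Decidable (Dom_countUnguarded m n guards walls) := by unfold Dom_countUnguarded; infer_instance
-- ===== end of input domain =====

-- B replaces A's four directional grid sweeps (with seen flags and -1 marking) by a per-cell
-- outward ray walk over the placed grid (alternative decomposition, not claimed faster);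
-- Pre_countUnguarded admits exactly the inputs on which the Python A returns.

-- ===== PORT A =====
-- grid[i][j] read and 'grid[r][c] = v' write; Python-exact (including negative-index
-- wraparound) on the index ranges Pre_countUnguarded admits
def pvGet (g : List (List Int)) (i j : Int) : Int :=
  PySem.List.pyGetD (PySem.List.pyGetD g i []) j 0
def pvSet (g : List (List Int)) (i j : Int) (v : Int) : List (List Int) :=
  PySem.List.pySetD g i (PySem.List.pySetD (PySem.List.pyGetD g i []) j v)
-- loop body of A's wall/guard placement loops ('for r,c in …: grid[r][c] = v')
def place (v : Int) (g : List (List Int)) (p : List Int) : List (List Int) :=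
  match p with | [r, c] => pvSet g r c v | _ => g
-- body of A's (identical) inner sweep loops: state is (grid, seen)
def lineStep (gs : List (List Int) × Bool) (i j : Int) : List (List Int) × Bool :=
  if pvGet gs.1 i j = 2 then (gs.1, false)
  else if pvGet gs.1 i j = 3 then (gs.1, true)
  else if gs.2 then (pvSet gs.1 i j (-1), gs.2) else (gs.1, gs.2)

def countUnguarded (m : Int) (n : Int) (guards : List (List Int)) (walls : List (List Int)) : Int :=
  let grid0 := (PySem.List.pyRange 0 m 1).map (fun _ => (PySem.List.pyRange 0 n 1).map (fun _ => (0:Int)))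
  let grid1 := walls.foldl (place 2) grid0
  let grid2 := guards.foldl (place 3) grid1
  let grid3 := (PySem.List.pyRange 0 m 1).foldl (fun g i =>
      let gs := (PySem.List.pyRange 0 n 1).foldl (fun gs j => lineStep gs i j) (g, false)
      let gs2 := (PySem.List.pyRange (n-1) (-1) (-1)).foldl (fun gs j => lineStep gs i j) (gs.1, false)
      gs2.1) grid2
  let grid4 := (PySem.List.pyRange 0 n 1).foldl (fun g j =>
      let gs := (PySem.List.pyRange 0 m 1).foldl (fun gs i => lineStep gs i j) (g, false)
      let gs2 := (PySem.List.pyRange (m-1) (-1) (-1)).foldl (fun gs i => lineStep gs i j) (gs.1, false)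
      gs2.1) grid3
  (PySem.List.pyRange 0 m 1).foldl (fun cnt i =>
    (PySem.List.pyRange 0 n 1).foldl (fun cnt j =>
      if pvGet grid4 i j = 0 then cnt + 1 else cnt) cnt) 0

-- ===== PORT B =====
-- B's while-loop ray walk, reading the placed grid; the fuel m.toNat + n.toNat + 1 bounds the
-- loop's iteration count (each step moves one unit along a fixed axis towards a violated bound)
def walkG (m n : Int) (g : List (List Int)) (di dj : Int) : Nat → Int → Int → Bool
  | 0, _, _ => false
  | fuel+1, x, y =>
    if 0 ≤ x ∧ x < m ∧ 0 ≤ y ∧ y < n then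
      if pvGet g x y = 3 then true
      else if pvGet g x y = 2 then false
      else walkG m n g di dj fuel (x + di) (y + dj)
    else false
def seesGuardG (m n : Int) (g : List (List Int)) (x y di dj : Int) : Bool :=
  walkG m n g di dj (m.toNat + n.toNat + 1) x y

def countUnguarded_alt (m : Int) (n : Int) (guards : List (List Int)) (walls : List (List Int)) : Int :=
  let grid0 := (PySem.List.pyRange 0 m 1).map (fun _ => (PySem.List.pyRange 0 n 1).map (fun _ => (0:Int)))
  let grid1 := walls.foldl (place 2) grid0
  let grid2 := guards.foldl (place 3) grid1
  (PySem.List.pyRange 0 m 1).foldl (fun cnt i =>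
    (PySem.List.pyRange 0 n 1).foldl (fun cnt j =>
      if pvGet grid2 i j = 0 ∧ (([((0:Int),(-1:Int)), (0,1), (-1,0), (1,0)]).any
          (fun d => seesGuardG m n grid2 (i + d.1) (j + d.2) d.1 d.2)) = false
      then cnt + 1 else cnt) cnt) 0

-- ===== PRECONDITION & SPEC =====
def okPair (m n : Int) (p : List Int) : Bool :=
  match p with
  | [r, c] => decide (-m ≤ r ∧ r < m ∧ -n ≤ c ∧ c < n)
  | _ => false
-- Pre_ admits exactly the inputs on which the Python A returns normally: every guard/wall
-- entry is a pair of coordinates in Python's indexing range (negative indices wrap);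
-- outside it A raises IndexError (index out of range) or ValueError (row not a pair).
def Pre_countUnguarded (m : Int) (n : Int) (guards : List (List Int)) (walls : List (List Int)) : Prop :=
  guards.all (okPair m n) = true ∧ walls.all (okPair m n) = true
instance (m : Int) (n : Int) (guards : List (List Int)) (walls : List (List Int)) : Decidable (Pre_countUnguarded m n guards walls) := by unfold Pre_countUnguarded; infer_instance
def pvWitness_countUnguarded : Int × Int × List (List Int) × List (List Int) := (2, 3, [[0, 0]], [[1, 1]])

def Spec_countUnguarded (m : Int) (n : Int) (guards : List (List Int)) (walls : List (List Int)) (out : Int) : Prop := out = countUnguarded_alt m n guards walls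
instance (m : Int) (n : Int) (guards : List (List Int)) (walls : List (List Int)) (out : Int) : Decidable (Spec_countUnguarded m n guards walls out) := by unfold Spec_countUnguarded; infer_instance

-- ===== CLAIM (what is proved, stated in full; the proofs are below) =====
def Claim_equal_countUnguarded : Prop := ∀ (m : Int) (n : Int) (guards : List (List Int)) (walls : List (List Int)), Dom_countUnguarded m n guards walls → Pre_countUnguarded m n guards walls → Spec_countUnguarded m n guards walls (countUnguarded m n guards walls)

-- ===== LEMMAS AND PROOFS =====

-- Abstraction: every intermediate grid A builds is the m×n table of a pointwise cell function
-- (3 on guards, 2 on walls, -1 on marked, 0 otherwise); sweeps only change the marked set.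
def cellVal (G W M : Int × Int → Bool) (q : Int × Int) : Int :=
  if G q then 3 else if W q then 2 else if M q then -1 else 0
def reprG (m n : Int) (G W M : Int × Int → Bool) : List (List Int) :=
  (PySem.List.pyRange 0 m 1).map (fun a => (PySem.List.pyRange 0 n 1).map (fun b => cellVal G W M (a, b)))

-- pure mirror of lineStep on (marked set, seen flag)
def mstep (G W : Int × Int → Bool) (Ms : (Int × Int → Bool) × Bool) (p : Int × Int) :
    (Int × Int → Bool) × Bool :=
  if G p then (Ms.1, true)
  else if W p then (Ms.1, false)
  else if Ms.2 then (fun q => Ms.1 q || decide (q = p), true) else Ms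

-- seen flag after processing cells pos 0, …, pos (t-1)
def seenB (G W : Int × Int → Bool) (pos : Nat → Int × Int) : Nat → Bool
  | 0 => false
  | t+1 => if G (pos t) then true else if W (pos t) then false else seenB G W pos t

-- cells newly marked by one directional pass over pos 0, …, pos (k-1)
def covAny (G W : Int × Int → Bool) (pos : Nat → Int × Int) (k : Nat) (q : Int × Int) : Bool :=
  (List.range k).any fun t => decide (pos t = q) && !(G (pos t)) && !(W (pos t)) && seenB G W pos t

-- Python's negative-index wraparound, and the grid cell a placement row [r, c] writes to
def wrapI (L x : Int) : Int := if x < 0 then x + L else x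
def hitP (m n : Int) (p : List Int) (q : Int × Int) : Bool :=
  match p with
  | [r, c] => decide ((wrapI m r, wrapI n c) = q)
  | _ => false

lemma pyGetD_wrap {α : Type} (xs : List α) (i : Int) (d : α)
    (h0 : -(xs.length : Int) ≤ i) (h1 : i < (xs.length : Int)) :
    PySem.List.pyGetD xs i d = xs.getD (wrapI (xs.length : Int) i).toNat d := by
  unfold PySem.List.pyGetD PySem.List.pyGet? PySem.List.pyIdx? wrapI
  by_cases hi : 0 ≤ i
  · rw [if_pos hi, if_pos (by omega), if_neg (by omega)]
    simp [List.getD_eq_getElem?_getD]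
  · rw [if_neg hi, if_pos (by omega), if_pos (by omega)]
    rw [List.getD_eq_getElem?_getD]
    have he : xs.length - (-i).toNat = (i + (xs.length : Int)).toNat := by omega
    simp [he]

lemma pySetD_wrap {α : Type} (xs : List α) (i : Int) (v : α)
    (h0 : -(xs.length : Int) ≤ i) (h1 : i < (xs.length : Int)) :
    PySem.List.pySetD xs i v = xs.set (wrapI (xs.length : Int) i).toNat v := by
  unfold PySem.List.pySetD PySem.List.pySet? PySem.List.pyIdx? wrapI
  by_cases hi : 0 ≤ i
  · rw [if_pos hi, if_pos (by omega), if_neg (by omega)]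
    simp
  · rw [if_neg hi, if_pos (by omega), if_pos (by omega)]
    simp only [Option.map_some, Option.getD_some]
    congr 1
    omega

lemma okPair_shape {m n : Int} {p : List Int} (h : okPair m n p = true) :
    ∃ r c, p = [r, c] ∧ -m ≤ r ∧ r < m ∧ -n ≤ c ∧ c < n := by
  match p with
  | [r, c] => exact ⟨r, c, rfl, by simpa [okPair] using h⟩
  | [] => simp [okPair] at h
  | [_] => simp [okPair] at h
  | _::_::_::_ => simp [okPair] at h

lemma pvGet_reprG (m n : Int) (G W M : Int × Int → Bool) {i j : Int}
    (hi : 0 ≤ i) (him : i < m) (hj : 0 ≤ j) (hjn : j < n) :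
    pvGet (reprG m n G W M) i j = cellVal G W M (i, j) := by
  unfold pvGet reprG
  rw [PySem.List.pyRange_one 0 m, PySem.List.pyRange_one 0 n]
  simp only [List.map_map, sub_zero]
  rw [PySem.List.pyGetD_eq_getElem (i := i) _ _ hi
    (by simp only [List.length_map, List.length_range]; omega)]
  simp only [List.getElem_map, List.getElem_range, Function.comp]
  rw [PySem.List.pyGetD_eq_getElem (i := j) _ _ hj
    (by simp only [List.length_map, List.length_range]; omega)]
  simp only [List.getElem_map, List.getElem_range, Function.comp]
  have e1 : (0:Int) + (i.toNat : Int) = i := by omega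
  have e2 : (0:Int) + (j.toNat : Int) = j := by omega
  rw [e1, e2]

lemma grid_eq_reprG (m n : Int) (f : Int → Int → Int) (G W M : Int × Int → Bool)
    (h : ∀ a b, 0 ≤ a → a < m → 0 ≤ b → b < n → f a b = cellVal G W M (a, b)) :
    (PySem.List.pyRange 0 m 1).map (fun a => (PySem.List.pyRange 0 n 1).map (fun b => f a b))
      = reprG m n G W M := by
  unfold reprG
  apply List.map_congr_left
  intro a ha
  apply List.map_congr_left
  intro b hb
  rw [PySem.List.mem_pyRange_one] at ha hb
  exact h a b ha.1 ha.2 hb.1 hb.2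

lemma pvSet_grid (m n : Int) (f : Int → Int → Int) {r c : Int} (v : Int)
    (hr0 : -m ≤ r) (hrm : r < m) (hc0 : -n ≤ c) (hcn : c < n) :
    pvSet ((PySem.List.pyRange 0 m 1).map (fun a => (PySem.List.pyRange 0 n 1).map (fun b => f a b))) r c v
      = (PySem.List.pyRange 0 m 1).map (fun a => (PySem.List.pyRange 0 n 1).map
          (fun b => if a = wrapI m r ∧ b = wrapI n c then v else f a b)) := by
  have hw1 : 0 ≤ wrapI m r ∧ wrapI m r < m := by unfold wrapI; split_ifs <;> omega
  have hw2 : 0 ≤ wrapI n c ∧ wrapI n c < n := by unfold wrapI; split_ifs <;> omega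
  unfold pvSet
  rw [PySem.List.pyRange_one 0 m, PySem.List.pyRange_one 0 n]
  simp only [List.map_map, sub_zero]
  rw [pySetD_wrap _ r _ (by simp only [List.length_map, List.length_range]; omega)
      (by simp only [List.length_map, List.length_range]; omega)]
  rw [pyGetD_wrap _ r _ (by simp only [List.length_map, List.length_range]; omega)
      (by simp only [List.length_map, List.length_range]; omega)]
  simp only [List.length_map, List.length_range]
  rw [show ((m.toNat : Int)) = m from by omega]
  rw [List.getD_eq_getElem _ _ (by simp only [List.length_map, List.length_range]; omega)]
  simp only [List.getElem_map, List.getElem_range, Function.comp]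
  rw [pySetD_wrap _ c _ (by simp only [List.length_map, List.length_range]; omega)
      (by simp only [List.length_map, List.length_range]; omega)]
  simp only [List.length_map, List.length_range]
  rw [show ((n.toNat : Int)) = n from by omega]
  apply List.ext_getElem
  · simp
  · intro a ha1 ha2
    simp only [List.length_set, List.length_map, List.length_range] at ha1
    rw [List.getElem_set]
    simp only [List.getElem_map, List.getElem_range, Function.comp]
    by_cases hai : (wrapI m r).toNat = a
    · rw [if_pos hai]
      subst hai
      apply List.ext_getElem
      · simp
      · intro b hb1 hb2
        simp only [List.length_set, List.length_map, List.length_range] at hb1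
        rw [List.getElem_set]
        simp only [List.getElem_map, List.getElem_range, Function.comp]
        have e1 : ((0:Int) + ((wrapI m r).toNat : Int) = wrapI m r) := by omega
        by_cases hbj : (wrapI n c).toNat = b
        · rw [if_pos hbj]
          subst hbj
          have e2 : ((0:Int) + ((wrapI n c).toNat : Int) = wrapI n c) := by omega
          rw [if_pos ⟨e1, e2⟩]
        · rw [if_neg hbj]
          rw [if_neg (show ¬((0:Int) + ((wrapI m r).toNat : Int) = wrapI m r ∧
              (0:Int) + (b : Int) = wrapI n c) by omega)]
    · rw [if_neg hai]
      apply List.map_congr_left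
      intro b _
      simp only [Function.comp]
      rw [if_neg (show ¬((0:Int) + (a : Int) = wrapI m r ∧
          (0:Int) + (b : Int) = wrapI n c) by omega)]

lemma reprG_congr (m n : Int) (G W M G' W' M' : Int × Int → Bool)
    (h : ∀ a b, 0 ≤ a → a < m → 0 ≤ b → b < n → cellVal G W M (a, b) = cellVal G' W' M' (a, b)) :
    reprG m n G W M = reprG m n G' W' M' := by
  rw [show reprG m n G W M = (PySem.List.pyRange 0 m 1).map
      (fun a => (PySem.List.pyRange 0 n 1).map (fun b => cellVal G W M (a, b))) from rfl]
  exact grid_eq_reprG m n _ G' W' M' h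

lemma walls_fold (m n : Int) (ws : List (List Int)) (W : Int × Int → Bool)
    (hws : ws.all (okPair m n) = true) :
    ws.foldl (place 2) (reprG m n (fun _ => false) W (fun _ => false))
      = reprG m n (fun _ => false) (fun q => W q || ws.any (fun p => hitP m n p q)) (fun _ => false) := by
  induction ws generalizing W with
  | nil =>
    simp only [List.foldl_nil]
    apply reprG_congr
    intro a b _ _ _ _
    simp [cellVal]
  | cons p ws ih =>
    rw [List.all_cons, Bool.and_eq_true] at hws
    obtain ⟨r, c, rfl, hr0, hrm, hc0, hcn⟩ := okPair_shape hws.1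
    rw [List.foldl_cons]
    have hred : place 2 (reprG m n (fun _ => false) W (fun _ => false)) [r, c]
        = pvSet (reprG m n (fun _ => false) W (fun _ => false)) r c 2 := rfl
    rw [hred]
    have hstep : pvSet (reprG m n (fun _ => false) W (fun _ => false)) r c 2
        = reprG m n (fun _ => false) (fun q => W q || decide (q = (wrapI m r, wrapI n c))) (fun _ => false) := by
      rw [show reprG m n (fun _ => false) W (fun _ => false) = (PySem.List.pyRange 0 m 1).map
          (fun a => (PySem.List.pyRange 0 n 1).map (fun b => cellVal (fun _ => false) W (fun _ => false) (a, b))) from rfl]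
      rw [pvSet_grid m n _ 2 hr0 hrm hc0 hcn]
      apply grid_eq_reprG
      intro a b _ _ _ _
      by_cases hab : a = wrapI m r ∧ b = wrapI n c
      · simp [hab.1, hab.2, cellVal]
      · simp [cellVal, Prod.mk.injEq, hab]
    rw [hstep, ih _ hws.2]
    apply reprG_congr
    intro a b _ _ _ _
    have hh : ((W (a, b) || decide ((a, b) = (wrapI m r, wrapI n c))) || ws.any (fun p => hitP m n p (a, b)))
        = (W (a, b) || (hitP m n [r, c] (a, b) || ws.any (fun p => hitP m n p (a, b)))) := by
      have h1 : hitP m n [r, c] (a, b) = decide ((a, b) = (wrapI m r, wrapI n c)) := by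
        simp [hitP, eq_comm]
      rw [h1, Bool.or_assoc]
    simp only [cellVal, List.any_cons]
    rw [hh]

lemma guards_fold (m n : Int) (gs : List (List Int)) (G W : Int × Int → Bool)
    (hgs : gs.all (okPair m n) = true) :
    gs.foldl (place 3) (reprG m n G W (fun _ => false))
      = reprG m n (fun q => G q || gs.any (fun p => hitP m n p q)) W (fun _ => false) := by
  induction gs generalizing G with
  | nil =>
    simp only [List.foldl_nil]
    apply reprG_congr
    intro a b _ _ _ _
    simp [cellVal]
  | cons p gs ih =>
    rw [List.all_cons, Bool.and_eq_true] at hgs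
    obtain ⟨r, c, rfl, hr0, hrm, hc0, hcn⟩ := okPair_shape hgs.1
    rw [List.foldl_cons]
    have hred : place 3 (reprG m n G W (fun _ => false)) [r, c]
        = pvSet (reprG m n G W (fun _ => false)) r c 3 := rfl
    rw [hred]
    have hstep : pvSet (reprG m n G W (fun _ => false)) r c 3
        = reprG m n (fun q => G q || decide (q = (wrapI m r, wrapI n c))) W (fun _ => false) := by
      rw [show reprG m n G W (fun _ => false) = (PySem.List.pyRange 0 m 1).map
          (fun a => (PySem.List.pyRange 0 n 1).map (fun b => cellVal G W (fun _ => false) (a, b))) from rfl]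
      rw [pvSet_grid m n _ 3 hr0 hrm hc0 hcn]
      apply grid_eq_reprG
      intro a b _ _ _ _
      by_cases hab : a = wrapI m r ∧ b = wrapI n c
      · simp [hab.1, hab.2, cellVal]
      · simp [cellVal, Prod.mk.injEq, hab]
    rw [hstep, ih _ hgs.2]
    apply reprG_congr
    intro a b _ _ _ _
    have hh : ((G (a, b) || decide ((a, b) = (wrapI m r, wrapI n c))) || gs.any (fun p => hitP m n p (a, b)))
        = (G (a, b) || (hitP m n [r, c] (a, b) || gs.any (fun p => hitP m n p (a, b)))) := by
      have h1 : hitP m n [r, c] (a, b) = decide ((a, b) = (wrapI m r, wrapI n c)) := by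
        simp [hitP, eq_comm]
      rw [h1, Bool.or_assoc]
    simp only [cellVal, List.any_cons]
    rw [hh]

lemma pvSet_mark (m n : Int) (G W M : Int × Int → Bool) {i j : Int}
    (hi : 0 ≤ i) (him : i < m) (hj : 0 ≤ j) (hjn : j < n)
    (hG : G (i, j) = false) (hW : W (i, j) = false) :
    pvSet (reprG m n G W M) i j (-1)
      = reprG m n G W (fun q => M q || decide (q = (i, j))) := by
  have hwi : wrapI m i = i := by unfold wrapI; rw [if_neg (by omega)]
  have hwj : wrapI n j = j := by unfold wrapI; rw [if_neg (by omega)]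
  rw [show reprG m n G W M = (PySem.List.pyRange 0 m 1).map
      (fun a => (PySem.List.pyRange 0 n 1).map (fun b => cellVal G W M (a, b))) from rfl]
  rw [pvSet_grid m n _ (-1) (by omega) him (by omega) hjn]
  rw [hwi, hwj]
  apply grid_eq_reprG
  intro a b _ _ _ _
  by_cases hab : a = i ∧ b = j
  · obtain ⟨rfl, rfl⟩ := hab
    simp [cellVal, hG, hW]
  · have hne : ¬ ((a, b) = (i, j)) := by
      intro hcontra
      exact hab ⟨congrArg Prod.fst hcontra, congrArg Prod.snd hcontra⟩
    simp [cellVal, hab, hne]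

lemma lineStep_reprG (m n : Int) (G W M : Int × Int → Bool) (s : Bool) {i j : Int}
    (hi : 0 ≤ i) (him : i < m) (hj : 0 ≤ j) (hjn : j < n) :
    lineStep (reprG m n G W M, s) i j
      = (reprG m n G W (mstep G W (M, s) (i, j)).1, (mstep G W (M, s) (i, j)).2) := by
  unfold lineStep mstep
  simp only [pvGet_reprG m n G W M hi him hj hjn, cellVal]
  by_cases hG : G (i, j)
  · simp [hG]
  · by_cases hW : W (i, j)
    · simp [hG, hW]
    · by_cases hM : M (i, j)
      · cases s with
        | false => simp [hG, hW, hM]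
        | true =>
          simp only [hG, hW, hM, Bool.false_eq_true, if_false, if_true,
            reduceCtorEq, if_neg (by norm_num : ¬ (-1 : Int) = 2), if_neg (by norm_num : ¬ (-1 : Int) = 3)]
          rw [pvSet_mark m n G W M hi him hj hjn (by simp [hG]) (by simp [hW])]
      · cases s with
        | false => simp [hG, hW, hM]
        | true =>
          simp only [hG, hW, hM, Bool.false_eq_true, if_false, if_true,
            if_neg (by norm_num : ¬ (0 : Int) = 2), if_neg (by norm_num : ¬ (0 : Int) = 3)]
          rw [pvSet_mark m n G W M hi him hj hjn (by simp [hG]) (by simp [hW])]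

lemma fold_lineStep (m n : Int) (G W : Int × Int → Bool) (cells : List (Int × Int))
    (hc : ∀ p ∈ cells, 0 ≤ p.1 ∧ p.1 < m ∧ 0 ≤ p.2 ∧ p.2 < n) (M : Int × Int → Bool) (s : Bool) :
    cells.foldl (fun gs p => lineStep gs p.1 p.2) (reprG m n G W M, s)
      = (reprG m n G W (cells.foldl (mstep G W) (M, s)).1, (cells.foldl (mstep G W) (M, s)).2) := by
  induction cells generalizing M s with
  | nil => simp
  | cons p cells ih =>
    obtain ⟨h1, h2, h3, h4⟩ := hc p (List.mem_cons_self ..)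
    rw [List.foldl_cons, lineStep_reprG m n G W M s h1 h2 h3 h4, List.foldl_cons]
    have := ih (fun p hp => hc p (List.mem_cons_of_mem _ hp)) (mstep G W (M, s) (p.1, p.2)).1
      (mstep G W (M, s) (p.1, p.2)).2
    simpa using this

lemma mstep_fold_char (G W : Int × Int → Bool) (pos : Nat → Int × Int) (M : Int × Int → Bool) (k : Nat) :
    ((List.range k).map pos).foldl (mstep G W) (M, false)
      = (fun q => M q || covAny G W pos k q, seenB G W pos k) := by
  induction k with
  | zero =>
    simp only [List.range_zero, List.map_nil, List.foldl_nil, seenB]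
    refine Prod.ext ?_ rfl
    funext q
    simp [covAny]
  | succ k ih =>
    rw [List.range_succ, List.map_append, List.foldl_append, ih]
    simp only [List.map_cons, List.map_nil, List.foldl_cons, List.foldl_nil]
    have hcov : ∀ q, covAny G W pos (k+1) q
        = (covAny G W pos k q || (decide (pos k = q) && !(G (pos k)) && !(W (pos k)) && seenB G W pos k)) := by
      intro q
      simp [covAny, List.range_succ]
    unfold mstep
    by_cases hG : G (pos k)
    · simp only [hG, if_true]
      refine Prod.ext ?_ ?_
      · funext q
        simp [hcov, hG]
      · simp [seenB, hG]
    · by_cases hW : W (pos k)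
      · simp only [hG, hW, Bool.false_eq_true, if_false, if_true]
        refine Prod.ext ?_ ?_
        · funext q
          simp [hcov, hG, hW]
        · simp [seenB, hG, hW]
      · cases hseen : seenB G W pos k with
        | false =>
          simp only [hG, hW, hseen, Bool.false_eq_true, if_false]
          refine Prod.ext ?_ ?_
          · funext q
            simp [hcov, hseen]
          · simp [seenB, hG, hW, hseen]
        | true =>
          simp only [hG, hW, hseen, Bool.false_eq_true, if_false, if_true]
          refine Prod.ext ?_ ?_
          · funext q
            simp only [hcov, hG, hW, hseen, Bool.not_false, Bool.and_true, Bool.not_true]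
            rw [show decide (q = pos k) = decide (pos k = q) by simp [eq_comm]]
            simp [Bool.or_assoc]
          · simp [seenB, hG, hW, hseen]

-- processing order of the four directional passes, as functions of the step index
def posL (i : Int) : Nat → Int × Int := fun t => (i, (t : Int))
def posR (n i : Int) : Nat → Int × Int := fun t => (i, n - 1 - (t : Int))
def posU (j : Int) : Nat → Int × Int := fun t => ((t : Int), j)
def posD (m j : Int) : Nat → Int × Int := fun t => (m - 1 - (t : Int), j)

lemma cellsL (i n : Int) :
    (PySem.List.pyRange 0 n 1).map (fun j => (i, j)) = (List.range n.toNat).map (posL i) := by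
  rw [PySem.List.pyRange_one, List.map_map]
  simp only [sub_zero]
  apply List.map_congr_left
  intro t _
  simp [posL, Function.comp]

lemma cellsR (i n : Int) :
    (PySem.List.pyRange (n-1) (-1) (-1)).map (fun j => (i, j)) = (List.range n.toNat).map (posR n i) := by
  rw [PySem.List.pyRange_neg_one, List.map_map]
  rw [show (n - 1 - (-1)).toNat = n.toNat from by omega]
  apply List.map_congr_left
  intro t _
  simp [posR, Function.comp]

lemma cellsU (j m : Int) :
    (PySem.List.pyRange 0 m 1).map (fun i => (i, j)) = (List.range m.toNat).map (posU j) := by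
  rw [PySem.List.pyRange_one, List.map_map]
  simp only [sub_zero]
  apply List.map_congr_left
  intro t _
  simp [posU, Function.comp]

lemma cellsD (j m : Int) :
    (PySem.List.pyRange (m-1) (-1) (-1)).map (fun i => (i, j)) = (List.range m.toNat).map (posD m j) := by
  rw [PySem.List.pyRange_neg_one, List.map_map]
  rw [show (m - 1 - (-1)).toNat = m.toNat from by omega]
  apply List.map_congr_left
  intro t _
  simp [posD, Function.comp]

lemma one_pass (m n : Int) (G W : Int × Int → Bool) (pos : Nat → Int × Int) (k : Nat)
    (hpos : ∀ t, t < k → 0 ≤ (pos t).1 ∧ (pos t).1 < m ∧ 0 ≤ (pos t).2 ∧ (pos t).2 < n)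
    (M : Int × Int → Bool) :
    ((List.range k).map pos).foldl (fun gs p => lineStep gs p.1 p.2) (reprG m n G W M, false)
      = (reprG m n G W (fun q => M q || covAny G W pos k q), seenB G W pos k) := by
  rw [fold_lineStep m n G W _ (by
    intro p hp
    simp only [List.mem_map, List.mem_range] at hp
    obtain ⟨t, ht, rfl⟩ := hp
    exact hpos t ht) M false]
  rw [mstep_fold_char]

lemma rows_pass (m n : Int) (G W : Int × Int → Bool) (is : List Int)
    (his : ∀ i ∈ is, 0 ≤ i ∧ i < m) (M : Int × Int → Bool) :
    is.foldl (fun g i =>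
        ((PySem.List.pyRange (n-1) (-1) (-1)).foldl (fun gs j => lineStep gs i j)
          (((PySem.List.pyRange 0 n 1).foldl (fun gs j => lineStep gs i j) (g, false)).1, false)).1)
      (reprG m n G W M)
      = reprG m n G W (fun q => M q ||
          is.any (fun i => covAny G W (posL i) n.toNat q || covAny G W (posR n i) n.toNat q)) := by
  induction is generalizing M with
  | nil => simp
  | cons i is ih =>
    obtain ⟨hi0, him⟩ := his i (List.mem_cons_self ..)
    simp only [List.foldl_cons]
    have hL := one_pass m n G W (posL i) n.toNat
      (by intro t ht; exact ⟨hi0, him, by simp only [posL]; omega, by simp only [posL]; omega⟩) M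
    have hR := one_pass m n G W (posR n i) n.toNat
      (by intro t ht; exact ⟨hi0, him, by simp only [posR]; omega, by simp only [posR]; omega⟩)
      (fun q => M q || covAny G W (posL i) n.toNat q)
    rw [← cellsL i n, List.foldl_map] at hL
    rw [← cellsR i n, List.foldl_map] at hR
    dsimp only at hL hR
    rw [hL]
    dsimp only
    rw [hR]
    dsimp only
    rw [ih (fun a ha => his a (List.mem_cons_of_mem _ ha))]
    exact congrArg (reprG m n G W) (funext fun q => by
      simp only [List.any_cons, Bool.or_assoc])

lemma cols_pass (m n : Int) (G W : Int × Int → Bool) (js : List Int)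
    (hjs : ∀ j ∈ js, 0 ≤ j ∧ j < n) (M : Int × Int → Bool) :
    js.foldl (fun g j =>
        ((PySem.List.pyRange (m-1) (-1) (-1)).foldl (fun gs i => lineStep gs i j)
          (((PySem.List.pyRange 0 m 1).foldl (fun gs i => lineStep gs i j) (g, false)).1, false)).1)
      (reprG m n G W M)
      = reprG m n G W (fun q => M q ||
          js.any (fun j => covAny G W (posU j) m.toNat q || covAny G W (posD m j) m.toNat q)) := by
  induction js generalizing M with
  | nil => simp
  | cons j js ih =>
    obtain ⟨hj0, hjn⟩ := hjs j (List.mem_cons_self ..)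
    simp only [List.foldl_cons]
    have hU := one_pass m n G W (posU j) m.toNat
      (by intro t ht; exact ⟨by simp only [posU]; omega, by simp only [posU]; omega, hj0, hjn⟩) M
    have hD := one_pass m n G W (posD m j) m.toNat
      (by intro t ht; exact ⟨by simp only [posD]; omega, by simp only [posD]; omega, hj0, hjn⟩)
      (fun q => M q || covAny G W (posU j) m.toNat q)
    rw [← cellsU j m, List.foldl_map] at hU
    rw [← cellsD j m, List.foldl_map] at hD
    dsimp only at hU hD
    rw [hU]
    dsimp only
    rw [hD]
    dsimp only
    rw [ih (fun a ha => hjs a (List.mem_cons_of_mem _ ha))]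
    exact congrArg (reprG m n G W) (funext fun q => by
      simp only [List.any_cons, Bool.or_assoc])

lemma walkG_left (m n : Int) (G W : Int × Int → Bool) (a : Int)
    (ha0 : 0 ≤ a) (ham : a < m) :
    ∀ (k : Nat) (fuel : Nat), k ≤ fuel → (k : Int) ≤ n →
    walkG m n (reprG m n G W (fun _ => false)) 0 (-1) fuel a ((k : Int) - 1)
      = seenB G W (posL a) k := by
  intro k
  induction k with
  | zero =>
    intro fuel _ _
    cases fuel with
    | zero => simp [walkG, seenB]
    | succ f =>
      rw [walkG, if_neg (by omega : ¬(0 ≤ a ∧ a < m ∧ 0 ≤ ((0:Nat):Int) - 1 ∧ ((0:Nat):Int) - 1 < n))]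
      try simp [seenB]
  | succ k ihk =>
    intro fuel hf hk
    cases fuel with
    | zero => exact absurd hf (by omega)
    | succ f =>
      rw [walkG, if_pos (by omega : (0 ≤ a ∧ a < m ∧ 0 ≤ ((k+1:Nat):Int) - 1 ∧ ((k+1:Nat):Int) - 1 < n))]
      rw [show ((k+1 : Nat) : Int) - 1 = (k : Int) from by push_cast; ring]
      rw [pvGet_reprG m n G W _ ha0 ham (by omega) (by omega)]
      rw [show a + (0:Int) = a from by ring, show (k:Int) + -1 = (k:Int) - 1 from by ring]
      rw [ihk f (by omega) (by omega), seenB]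
      by_cases hg : G (a, (k : Int)) = true
      · simp [cellVal, posL, hg]
      · by_cases hw : W (a, (k : Int)) = true
        · simp [cellVal, posL, hg, hw]
        · simp [cellVal, posL, hg, hw]

lemma walkG_right (m n : Int) (G W : Int × Int → Bool) (a : Int)
    (ha0 : 0 ≤ a) (ham : a < m) :
    ∀ (k : Nat) (fuel : Nat), k ≤ fuel → (k : Int) ≤ n →
    walkG m n (reprG m n G W (fun _ => false)) 0 1 fuel a (n - (k : Int))
      = seenB G W (posR n a) k := by
  intro k
  induction k with
  | zero =>
    intro fuel _ _
    cases fuel with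
    | zero => simp [walkG, seenB]
    | succ f =>
      rw [walkG, if_neg (by omega : ¬(0 ≤ a ∧ a < m ∧ 0 ≤ n - ((0:Nat):Int) ∧ n - ((0:Nat):Int) < n))]
      try simp [seenB]
  | succ k ihk =>
    intro fuel hf hk
    cases fuel with
    | zero => exact absurd hf (by omega)
    | succ f =>
      rw [walkG, if_pos (by omega : (0 ≤ a ∧ a < m ∧ 0 ≤ n - ((k+1:Nat):Int) ∧ n - ((k+1:Nat):Int) < n))]
      rw [show n - ((k+1 : Nat) : Int) = n - 1 - (k : Int) from by push_cast; ring]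
      rw [pvGet_reprG m n G W _ ha0 ham (by omega) (by omega)]
      rw [show a + (0:Int) = a from by ring, show n - 1 - (k:Int) + 1 = n - (k:Int) from by ring]
      rw [ihk f (by omega) (by omega), seenB]
      by_cases hg : G (a, n - 1 - (k : Int)) = true
      · simp [cellVal, posR, hg]
      · by_cases hw : W (a, n - 1 - (k : Int)) = true
        · simp [cellVal, posR, hg, hw]
        · simp [cellVal, posR, hg, hw]

lemma walkG_up (m n : Int) (G W : Int × Int → Bool) (b : Int)
    (hb0 : 0 ≤ b) (hbn : b < n) :
    ∀ (k : Nat) (fuel : Nat), k ≤ fuel → (k : Int) ≤ m →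
    walkG m n (reprG m n G W (fun _ => false)) (-1) 0 fuel ((k : Int) - 1) b
      = seenB G W (posU b) k := by
  intro k
  induction k with
  | zero =>
    intro fuel _ _
    cases fuel with
    | zero => simp [walkG, seenB]
    | succ f =>
      rw [walkG, if_neg (by omega : ¬(0 ≤ ((0:Nat):Int) - 1 ∧ ((0:Nat):Int) - 1 < m ∧ 0 ≤ b ∧ b < n))]
      try simp [seenB]
  | succ k ihk =>
    intro fuel hf hk
    cases fuel with
    | zero => exact absurd hf (by omega)
    | succ f =>
      rw [walkG, if_pos (by omega : (0 ≤ ((k+1:Nat):Int) - 1 ∧ ((k+1:Nat):Int) - 1 < m ∧ 0 ≤ b ∧ b < n))]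
      rw [show ((k+1 : Nat) : Int) - 1 = (k : Int) from by push_cast; ring]
      rw [pvGet_reprG m n G W _ (by omega) (by omega) hb0 hbn]
      rw [show b + (0:Int) = b from by ring, show (k:Int) + -1 = (k:Int) - 1 from by ring]
      rw [ihk f (by omega) (by omega), seenB]
      by_cases hg : G ((k : Int), b) = true
      · simp [cellVal, posU, hg]
      · by_cases hw : W ((k : Int), b) = true
        · simp [cellVal, posU, hg, hw]
        · simp [cellVal, posU, hg, hw]

lemma walkG_down (m n : Int) (G W : Int × Int → Bool) (b : Int)
    (hb0 : 0 ≤ b) (hbn : b < n) :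
    ∀ (k : Nat) (fuel : Nat), k ≤ fuel → (k : Int) ≤ m →
    walkG m n (reprG m n G W (fun _ => false)) 1 0 fuel (m - (k : Int)) b
      = seenB G W (posD m b) k := by
  intro k
  induction k with
  | zero =>
    intro fuel _ _
    cases fuel with
    | zero => simp [walkG, seenB]
    | succ f =>
      rw [walkG, if_neg (by omega : ¬(0 ≤ m - ((0:Nat):Int) ∧ m - ((0:Nat):Int) < m ∧ 0 ≤ b ∧ b < n))]
      try simp [seenB]
  | succ k ihk =>
    intro fuel hf hk
    cases fuel with
    | zero => exact absurd hf (by omega)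
    | succ f =>
      rw [walkG, if_pos (by omega : (0 ≤ m - ((k+1:Nat):Int) ∧ m - ((k+1:Nat):Int) < m ∧ 0 ≤ b ∧ b < n))]
      rw [show m - ((k+1 : Nat) : Int) = m - 1 - (k : Int) from by push_cast; ring]
      rw [pvGet_reprG m n G W _ (by omega) (by omega) hb0 hbn]
      rw [show b + (0:Int) = b from by ring, show m - 1 - (k:Int) + 1 = m - (k:Int) from by ring]
      rw [ihk f (by omega) (by omega), seenB]
      by_cases hg : G (m - 1 - (k : Int), b) = true
      · simp [cellVal, posD, hg]
      · by_cases hw : W (m - 1 - (k : Int), b) = true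
        · simp [cellVal, posD, hg, hw]
        · simp [cellVal, posD, hg, hw]

lemma covAny_spec (G W : Int × Int → Bool) (pos : Nat → Int × Int) (k : Nat) (q : Int × Int) :
    covAny G W pos k q = true ↔
      ∃ t, t < k ∧ pos t = q ∧ G q = false ∧ W q = false ∧ seenB G W pos t = true := by
  unfold covAny
  rw [List.any_eq_true]
  constructor
  · rintro ⟨t, ht, hb⟩
    rw [List.mem_range] at ht
    simp only [Bool.and_eq_true, decide_eq_true_eq, Bool.not_eq_true'] at hb
    obtain ⟨⟨⟨h1, h2⟩, h3⟩, h4⟩ := hb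
    exact ⟨t, ht, h1, h1 ▸ h2, h1 ▸ h3, h4⟩
  · rintro ⟨t, ht, hpt, hG, hW, hs⟩
    refine ⟨t, List.mem_range.mpr ht, ?_⟩
    simp only [Bool.and_eq_true, decide_eq_true_eq, Bool.not_eq_true']
    exact ⟨⟨⟨hpt, hpt ▸ hG⟩, hpt ▸ hW⟩, hs⟩

lemma cellVal_open (G W M : Int × Int → Bool) (q : Int × Int)
    (hG : G q = false) (hW : W q = false) :
    cellVal G W M q = (if M q = true then (-1 : Int) else 0) := by
  unfold cellVal
  rw [if_neg (by simp [hG]), if_neg (by simp [hW])]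

lemma rows_collapse (m n : Int) (G W : Int × Int → Bool) {i j : Int}
    (hi : 0 ≤ i) (him : i < m) (hj : 0 ≤ j) (hjn : j < n)
    (hG : G (i, j) = false) (hW : W (i, j) = false) :
    (PySem.List.pyRange 0 m 1).any
        (fun a => covAny G W (posL a) n.toNat (i, j) || covAny G W (posR n a) n.toNat (i, j))
      = (seenB G W (posL i) j.toNat || seenB G W (posR n i) (n-1-j).toNat) := by
  rw [Bool.eq_iff_iff, List.any_eq_true, Bool.or_eq_true]
  constructor
  · rintro ⟨a, ha, hcov⟩
    rw [PySem.List.mem_pyRange_one] at ha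
    simp only [Bool.or_eq_true] at hcov
    cases hcov with
    | inl hc =>
      rw [covAny_spec] at hc
      obtain ⟨t, ht, hpt, _, _, hs⟩ := hc
      have ha' : a = i := congrArg Prod.fst hpt
      have ht2 : (t : Int) = j := congrArg Prod.snd hpt
      subst ha'
      have : t = j.toNat := by omega
      subst this
      exact Or.inl hs
    | inr hc =>
      rw [covAny_spec] at hc
      obtain ⟨t, ht, hpt, _, _, hs⟩ := hc
      have ha' : a = i := congrArg Prod.fst hpt
      have ht2 : n - 1 - (t : Int) = j := congrArg Prod.snd hpt
      subst ha'
      have : t = (n-1-j).toNat := by omega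
      subst this
      exact Or.inr hs
  · intro h
    refine ⟨i, PySem.List.mem_pyRange_one.mpr ⟨hi, him⟩, ?_⟩
    simp only [Bool.or_eq_true]
    cases h with
    | inl hs =>
      refine Or.inl ((covAny_spec ..).mpr ⟨j.toNat, by omega, ?_, hG, hW, hs⟩)
      unfold posL
      rw [show ((j.toNat : Int)) = j from by omega]
    | inr hs =>
      refine Or.inr ((covAny_spec ..).mpr ⟨(n-1-j).toNat, by omega, ?_, hG, hW, hs⟩)
      unfold posR
      rw [show n - 1 - (((n-1-j).toNat : Int)) = j from by omega]

lemma cols_collapse (m n : Int) (G W : Int × Int → Bool) {i j : Int}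
    (hi : 0 ≤ i) (him : i < m) (hj : 0 ≤ j) (hjn : j < n)
    (hG : G (i, j) = false) (hW : W (i, j) = false) :
    (PySem.List.pyRange 0 n 1).any
        (fun b => covAny G W (posU b) m.toNat (i, j) || covAny G W (posD m b) m.toNat (i, j))
      = (seenB G W (posU j) i.toNat || seenB G W (posD m j) (m-1-i).toNat) := by
  rw [Bool.eq_iff_iff, List.any_eq_true, Bool.or_eq_true]
  constructor
  · rintro ⟨b, hb, hcov⟩
    rw [PySem.List.mem_pyRange_one] at hb
    simp only [Bool.or_eq_true] at hcov
    cases hcov with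
    | inl hc =>
      rw [covAny_spec] at hc
      obtain ⟨t, ht, hpt, _, _, hs⟩ := hc
      have hb' : b = j := congrArg Prod.snd hpt
      have ht2 : (t : Int) = i := congrArg Prod.fst hpt
      subst hb'
      have : t = i.toNat := by omega
      subst this
      exact Or.inl hs
    | inr hc =>
      rw [covAny_spec] at hc
      obtain ⟨t, ht, hpt, _, _, hs⟩ := hc
      have hb' : b = j := congrArg Prod.snd hpt
      have ht2 : m - 1 - (t : Int) = i := congrArg Prod.fst hpt
      subst hb'
      have : t = (m-1-i).toNat := by omega
      subst this
      exact Or.inr hs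
  · intro h
    refine ⟨j, PySem.List.mem_pyRange_one.mpr ⟨hj, hjn⟩, ?_⟩
    simp only [Bool.or_eq_true]
    cases h with
    | inl hs =>
      refine Or.inl ((covAny_spec ..).mpr ⟨i.toNat, by omega, ?_, hG, hW, hs⟩)
      unfold posU
      rw [show ((i.toNat : Int)) = i from by omega]
    | inr hs =>
      refine Or.inr ((covAny_spec ..).mpr ⟨(m-1-i).toNat, by omega, ?_, hG, hW, hs⟩)
      unfold posD
      rw [show m - 1 - (((m-1-i).toNat : Int)) = i from by omega]

lemma cell_cond (m n : Int) (guards walls : List (List Int)) (cnt : Int) {i j : Int}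
    (hi : 0 ≤ i) (him : i < m) (hj : 0 ≤ j) (hjn : j < n) :
    (if pvGet (reprG m n (fun q => guards.any (fun p => hitP m n p q)) (fun q => walls.any (fun p => hitP m n p q))
        (fun q => (PySem.List.pyRange 0 m 1).any (fun a =>
             covAny (fun q => guards.any (fun p => hitP m n p q)) (fun q => walls.any (fun p => hitP m n p q)) (posL a) n.toNat q ||
             covAny (fun q => guards.any (fun p => hitP m n p q)) (fun q => walls.any (fun p => hitP m n p q)) (posR n a) n.toNat q) ||
           (PySem.List.pyRange 0 n 1).any (fun b =>
             covAny (fun q => guards.any (fun p => hitP m n p q)) (fun q => walls.any (fun p => hitP m n p q)) (posU b) m.toNat q ||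
             covAny (fun q => guards.any (fun p => hitP m n p q)) (fun q => walls.any (fun p => hitP m n p q)) (posD m b) m.toNat q))) i j = 0
      then cnt + 1 else cnt)
    = (if pvGet (reprG m n (fun q => guards.any (fun p => hitP m n p q)) (fun q => walls.any (fun p => hitP m n p q)) (fun _ => false)) i j = 0 ∧
          (([((0:Int),(-1:Int)), (0,1), (-1,0), (1,0)]).any
            (fun d => seesGuardG m n (reprG m n (fun q => guards.any (fun p => hitP m n p q)) (fun q => walls.any (fun p => hitP m n p q)) (fun _ => false))
              (i + d.1) (j + d.2) d.1 d.2)) = false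
       then cnt + 1 else cnt) := by
  rw [pvGet_reprG m n _ _ _ hi him hj hjn, pvGet_reprG m n _ _ _ hi him hj hjn]
  by_cases hGq : guards.any (fun p => hitP m n p (i, j)) = true
  · simp [cellVal, hGq]
  · rw [Bool.not_eq_true] at hGq
    by_cases hWq : walls.any (fun p => hitP m n p (i, j)) = true
    · simp [cellVal, hGq, hWq]
    · rw [Bool.not_eq_true] at hWq
      have hGq' : (fun q => guards.any (fun p => hitP m n p q)) (i, j) = false := hGq
      have hWq' : (fun q => walls.any (fun p => hitP m n p q)) (i, j) = false := hWq
      rw [cellVal_open _ _ _ _ hGq' hWq', cellVal_open _ _ _ _ hGq' hWq']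
      rw [if_neg (show ¬(((fun _ : Int × Int => false) (i, j)) = true) from by simp)]
      simp only [List.any_cons, List.any_nil, seesGuardG, Bool.or_false]
      have hL := walkG_left m n (fun q => guards.any (fun p => hitP m n p q)) (fun q => walls.any (fun p => hitP m n p q)) i hi him j.toNat (m.toNat + n.toNat + 1)
        (by omega) (by omega)
      have hR := walkG_right m n (fun q => guards.any (fun p => hitP m n p q)) (fun q => walls.any (fun p => hitP m n p q)) i hi him ((n-1-j).toNat) (m.toNat + n.toNat + 1)
        (by omega) (by omega)
      have hU := walkG_up m n (fun q => guards.any (fun p => hitP m n p q)) (fun q => walls.any (fun p => hitP m n p q)) j hj hjn i.toNat (m.toNat + n.toNat + 1)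
        (by omega) (by omega)
      have hD := walkG_down m n (fun q => guards.any (fun p => hitP m n p q)) (fun q => walls.any (fun p => hitP m n p q)) j hj hjn ((m-1-i).toNat) (m.toNat + n.toNat + 1)
        (by omega) (by omega)
      rw [show ((j.toNat : Int)) - 1 = j + -1 from by omega] at hL
      rw [show n - (((n-1-j).toNat : Int)) = j + 1 from by omega] at hR
      rw [show ((i.toNat : Int)) - 1 = i + -1 from by omega] at hU
      rw [show m - (((m-1-i).toNat : Int)) = i + 1 from by omega] at hD
      simp only [show i + (0:Int) = i from by ring, show j + (0:Int) = j from by ring]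
      simp only [hL, hR, hU, hD]
      try dsimp only
      rw [rows_collapse m n _ _ hi him hj hjn hGq' hWq', cols_collapse m n _ _ hi him hj hjn hGq' hWq']
      simp only [Bool.or_assoc]
      split_ifs <;> simp_all

-- ===== VERDICT (by name: the statement is the Claim_ definition above) =====
theorem countUnguarded_spec : Claim_equal_countUnguarded := by
  intro m n guards walls _hdom hpre
  obtain ⟨hg, hw⟩ := hpre
  show countUnguarded m n guards walls = countUnguarded_alt m n guards walls
  simp only [countUnguarded, countUnguarded_alt]
  rw [show (PySem.List.pyRange 0 m 1).map (fun _ => (PySem.List.pyRange 0 n 1).map (fun _ => (0:Int)))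
      = reprG m n (fun _ => false) (fun _ => false) (fun _ => false) from by
    unfold reprG cellVal; simp]
  rw [walls_fold m n walls (fun _ => false) hw]
  rw [guards_fold m n guards _ _ hg]
  rw [rows_pass m n _ _ (PySem.List.pyRange 0 m 1)
    (fun a ha => by rw [PySem.List.mem_pyRange_one] at ha; exact ha) _]
  rw [cols_pass m n _ _ (PySem.List.pyRange 0 n 1)
    (fun a ha => by rw [PySem.List.mem_pyRange_one] at ha; exact ha) _]
  simp only [Bool.false_or]
  apply PySem.List.foldl_congr_mem
  intro cnt i hi
  rw [PySem.List.mem_pyRange_one] at hi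
  apply PySem.List.foldl_congr_mem
  intro cnt' j hj
  rw [PySem.List.mem_pyRange_one] at hj
  exact cell_cond m n guards walls cnt' hi.1 hi.2 hj.1 hj.2
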